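-- pv_equiv track=rewrite | github.com/AdamZhouSE/pythonHomework | Code/CodeRecords/2522/48102/242332.py | compare_sort
-- ===== SOURCE A (Python) =====
-- def compare_sort(arr1: list, arr2: list) -> list:
--     count = []
--     for i in arr2:
--         j = 0
--         while j < len(arr1):
--             if i == arr1[j]:
--                 count.append(i)
--                 arr1.remove(i)
--                 j -= 1
--             j += 1
--     arr1.sort()
--     count = count + arr1
--     return count
-- ===== SOURCE B (Python) =====
-- def compare_sort(arr1: list, arr2: list) -> list:
--     counts = {}
--     for x in arr1:
--         counts[x] = counts.get(x, 0) + 1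
--     out = []
--     seen = set()
--     for v in arr2:
--         if v not in seen:
--             out += [v] * counts.get(v, 0)
--             seen.add(v)
--     s2 = set(arr2)
--     rest = sorted(x for x in arr1 if x not in s2)
--     return out + rest
-- ===== Notes on version B (the rewrite author's own statement) =====
-- stated objective: faster
-- what changed: Replaces A's per-arr2-element rescan-and-remove of arr1 (list.remove inside a while loop) by a counting dict built once over arr1, a seen-set to skip duplicate arr2 values, and a single filtered+sorted pass for the leftovers.
import Mathlib
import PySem

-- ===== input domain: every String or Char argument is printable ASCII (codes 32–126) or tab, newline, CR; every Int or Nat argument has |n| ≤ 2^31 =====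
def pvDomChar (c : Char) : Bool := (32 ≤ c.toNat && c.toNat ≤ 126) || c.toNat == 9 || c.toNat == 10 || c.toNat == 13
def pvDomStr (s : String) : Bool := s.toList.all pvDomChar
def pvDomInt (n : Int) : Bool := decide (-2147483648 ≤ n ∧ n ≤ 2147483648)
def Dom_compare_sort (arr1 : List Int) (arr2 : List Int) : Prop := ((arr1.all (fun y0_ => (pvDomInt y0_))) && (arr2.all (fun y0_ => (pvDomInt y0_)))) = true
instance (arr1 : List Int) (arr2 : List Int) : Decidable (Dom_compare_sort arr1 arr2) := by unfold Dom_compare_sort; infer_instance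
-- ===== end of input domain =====

-- ===== PORT A =====
-- B builds a count dict over arr1 once instead of A's remove-rescan loop; measured faster (asymptotic).
-- Python A mutates its argument arr1 in place (remove/sort); the equivalence proved here is about the return value only.

-- A's inner while loop: scan arr1 from index j; on a match append i to count and remove i from arr1.
def pvRemoveLoop (i : Int) (j : Nat) (arr1 : List Int) (count : List Int) : List Int × List Int :=
  if h : j < arr1.length then
    if arr1[j] = i then
      pvRemoveLoop i j ((PySem.List.remove? arr1 i).getD arr1) (count ++ [i])
    else
      pvRemoveLoop i (j + 1) arr1 count
  else (arr1, count)
termination_by arr1.length - j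
decreasing_by
  · have hm : i ∈ arr1 := by
      rename_i heq
      exact heq ▸ List.getElem_mem h
    rw [PySem.List.remove?_eq_some_erase arr1 i hm]
    have := List.length_erase_of_mem hm
    simp only [Option.getD_some]
    omega
  · omega

def compare_sort (arr1 : List Int) (arr2 : List Int) : List Int :=
  let s := arr2.foldl (fun s i => pvRemoveLoop i 0 s.1 s.2) (arr1, ([] : List Int))
  s.2 ++ PySem.List.sorted s.1 (fun x => x) false

-- ===== PORT B =====
-- counts = {}; for x in arr1: counts[x] = counts.get(x, 0) + 1
def pvCounts (arr1 : List Int) : PySem.Dict Int Int :=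
  arr1.foldl (fun d x => d.insert x (d.getD x 0 + 1)) PySem.Dict.empty

def compare_sort_alt (arr1 : List Int) (arr2 : List Int) : List Int :=
  let counts := pvCounts arr1
  let os := arr2.foldl (fun (s : List Int × PySem.Set Int) v =>
      if !s.2.contains v then
        (s.1 ++ List.replicate (counts.getD v 0).toNat v, s.2.add v)
      else s)
    (([] : List Int), PySem.Set.empty)
  let s2 := PySem.Set.ofList arr2
  os.1 ++ PySem.List.sorted (arr1.filter (fun x => !s2.contains x)) (fun x => x) false

-- ===== PRECONDITION & SPEC =====
def Spec_compare_sort (arr1 : List Int) (arr2 : List Int) (out : List Int) : Prop := out = compare_sort_alt arr1 arr2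
instance (arr1 : List Int) (arr2 : List Int) (out : List Int) : Decidable (Spec_compare_sort arr1 arr2 out) := by unfold Spec_compare_sort; infer_instance

-- ===== CLAIM (what is proved, stated in full; the proofs are below) =====
def Claim_equal_compare_sort : Prop := ∀ (arr1 : List Int) (arr2 : List Int), Dom_compare_sort arr1 arr2 → Spec_compare_sort arr1 arr2 (compare_sort arr1 arr2)

-- ===== LEMMAS AND PROOFS =====

-- the common shape of the ordered part: for each arr2 value, one run per remaining occurrence count
def pvChunks : List Int → List Int → List Int
  | _, [] => []
  | rem, v :: l =>
      List.replicate (rem.count v) v ++ pvChunks (rem.filter (fun x => x ≠ v)) l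

theorem pvRemoveLoop_spec (i : Int) (suf : List Int) : ∀ (pre count : List Int), i ∉ pre →
    pvRemoveLoop i pre.length (pre ++ suf) count =
      (pre ++ suf.filter (fun x => x ≠ i), count ++ List.replicate (suf.count i) i) := by
  induction suf with
  | nil =>
    intro pre count _
    rw [pvRemoveLoop]
    simp
  | cons x t ih =>
    intro pre count hpre
    rw [pvRemoveLoop]
    have hlen : pre.length < (pre ++ x :: t).length := by simp
    have hget : (pre ++ x :: t)[pre.length] = x := by
      simp [List.getElem_append_right]
    rw [dif_pos hlen]
    by_cases hx : x = i
    · subst hx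
      rw [if_pos hget]
      have hm : x ∈ pre ++ x :: t := by simp
      rw [PySem.List.remove?_eq_some_erase _ x hm, Option.getD_some,
        List.erase_append_right _ hpre, List.erase_cons_head]
      rw [ih pre (count ++ [x]) hpre]
      simp [List.filter_cons, List.count_cons, List.replicate_succ]
    · rw [if_neg (by rw [hget]; exact hx)]
      have h2 : pre.length + 1 = (pre ++ [x]).length := by simp
      have h3 : pre ++ x :: t = (pre ++ [x]) ++ t := by simp
      rw [h2, h3, ih (pre ++ [x]) count (by simp [hpre, Ne.symm hx] )]
      simp [List.filter_cons, hx, List.count_cons, Ne.symm hx]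


theorem pvRemoveLoop_zero (i : Int) (arr1 count : List Int) :
    pvRemoveLoop i 0 arr1 count =
      (arr1.filter (fun x => x ≠ i), count ++ List.replicate (arr1.count i) i) := by
  have := pvRemoveLoop_spec i arr1 [] count (by simp)
  simpa using this

theorem pvAfold (l : List Int) : ∀ (rem count : List Int),
    l.foldl (fun s i => pvRemoveLoop i 0 s.1 s.2) (rem, count)
      = (rem.filter (fun x => decide (x ∉ l)), count ++ pvChunks rem l) := by
  induction l with
  | nil => intro rem count; simp [pvChunks]
  | cons v l ih =>
    intro rem count
    rw [List.foldl_cons, pvRemoveLoop_zero, ih]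
    simp only [pvChunks, List.filter_filter, List.append_assoc]
    congr 1
    apply List.filter_congr
    intro x _
    simp [List.mem_cons, not_or, Bool.and_comm]

theorem pvCounts_getD (arr1 : List Int) (v : Int) :
    (pvCounts arr1).getD v 0 = (arr1.count v : Int) := by
  unfold pvCounts
  rw [PySem.Dict.getD_foldl_insert_add_one]
  simp [PySem.Dict.getD_empty]

theorem pvContains_eq (S : PySem.Set Int) (x : Int) :
    S.contains x = decide (x ∈ S) := by
  by_cases h : x ∈ S
  · simp [h, (PySem.Set.contains_iff S x).mpr h]
  · simp only [h, decide_false]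
    by_contra hc
    exact h ((PySem.Set.contains_iff S x).mp (by revert hc; cases S.contains x <;> simp))

theorem pvBfold (arr1 : List Int) (l : List Int) : ∀ (out : List Int) (S : PySem.Set Int),
    (l.foldl (fun (s : List Int × PySem.Set Int) v =>
        if !s.2.contains v then
          (s.1 ++ List.replicate ((pvCounts arr1).getD v 0).toNat v, s.2.add v)
        else s)
      (out, S)).1
      = out ++ pvChunks (arr1.filter (fun x => !S.contains x)) l := by
  induction l with
  | nil => intro out S; simp [pvChunks]
  | cons v l ih =>
    intro out S
    rw [List.foldl_cons]
    by_cases hv : v ∈ S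
    · rw [if_neg (by simp [pvContains_eq, hv])]
      rw [ih out S]
      have h0 : (arr1.filter (fun x => !decide (x ∈ S))).count v = 0 := by
        rw [List.count_eq_zero]
        intro hmem
        have := List.of_mem_filter hmem
        simp [hv] at this
      simp only [pvChunks, pvContains_eq, h0, List.replicate_zero, List.nil_append,
        List.filter_filter]
      have hfe : List.filter (fun a => decide (a ≠ v) && !decide (a ∈ S)) arr1
          = List.filter (fun x => !decide (x ∈ S)) arr1 := by
        apply List.filter_congr
        intro x _
        by_cases hxS : x ∈ S
        · simp [hxS]
        · have hne : x ≠ v := fun he => hxS (he ▸ hv)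
          simp [hxS, hne]
      rw [hfe]
    · rw [if_pos (by simp [pvContains_eq, hv])]
      rw [ih]
      have hcnt : ((pvCounts arr1).getD v 0).toNat
          = (arr1.filter (fun x => !S.contains x)).count v := by
        rw [pvCounts_getD, List.count_filter (by simp [pvContains_eq, hv])]
        simp
      have hfs : arr1.filter (fun x => !(S.add v).contains x)
          = (arr1.filter (fun x => !S.contains x)).filter (fun x => x ≠ v) := by
        rw [List.filter_filter]
        apply List.filter_congr
        intro x _
        simp only [pvContains_eq, PySem.Set.mem_add]
        by_cases hxv : x = v <;> by_cases hxS : x ∈ S <;> simp [hxv, hxS]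
      simp only [pvChunks, hcnt, ← List.append_assoc, ← hfs]

-- ===== VERDICT (by name: the statement is the Claim_ definition above) =====
theorem compare_sort_spec : Claim_equal_compare_sort := by
  intro arr1 arr2 _
  unfold Spec_compare_sort compare_sort compare_sort_alt pvCounts
  simp only
  rw [pvAfold]
  rw [show (arr1.foldl (fun d x => d.insert x (d.getD x 0 + 1)) PySem.Dict.empty) = pvCounts arr1 from rfl]
  rw [pvBfold]
  simp
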